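-- pv_equiv track=rewrite | github.com/rishipatel0529/youtube-recommendation-system | src/main.py | _round_robin_by_channel
-- ===== SOURCE A (Python) =====
-- from collections import defaultdict, Counter
--
-- def _round_robin_by_channel(ranked, id_to_video, cap, k):
--     buckets = defaultdict(list)
--     for vid, _ in ranked:
--         v = id_to_video.get(vid)
--         if not v: continue
--         ch = ((v.get("channel_id") or "").strip()
--               or (v.get("channel_title") or "").strip().lower())
--         buckets[ch].append(vid)
--
--     out_ids, taken_per_ch = [], defaultdict(int)
--     while len(out_ids) < k and buckets:
--         for ch in list(buckets.keys()):
--             if not buckets[ch]: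
--                 del buckets[ch]; continue
--             if taken_per_ch[ch] >= cap:
--                 buckets[ch].clear(); del buckets[ch]; continue
--             out_ids.append(buckets[ch].pop(0))
--             taken_per_ch[ch] += 1
--             if len(out_ids) >= k:
--                 break
--     return out_ids
-- ===== SOURCE B (Python) =====
-- def _round_robin_by_channel(ranked, id_to_video, cap, k):
--     buckets = {}
--     for vid, _ in ranked:
--         v = id_to_video.get(vid)
--         if not v:
--             continue
--         ch = ((v.get("channel_id") or "").strip()
--               or (v.get("channel_title") or "").strip().lower())
--         buckets.setdefault(ch, []).append(vid)
--
--     channels = list(buckets.keys())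
--     rounds = min(cap, max((len(b) for b in buckets.values()), default=0))
--     out_ids = []
--     for r in range(rounds):
--         for ch in channels:
--             if len(out_ids) >= k:
--                 return out_ids
--             b = buckets[ch]
--             if r < len(b):
--                 out_ids.append(b[r])
--     return out_ids
-- ===== Notes on version B (the rewrite author's own statement) =====
-- stated objective: simpler
-- what changed: Replaces the destructive while-loop (snapshot keys, pop(0), per-channel taken counters, bucket deletion) by a pure round-index scan: rounds = min(cap, longest bucket), then for each round r take buckets[ch][r] from every channel in insertion order, returning the moment k ids are collected.
import Mathlib
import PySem

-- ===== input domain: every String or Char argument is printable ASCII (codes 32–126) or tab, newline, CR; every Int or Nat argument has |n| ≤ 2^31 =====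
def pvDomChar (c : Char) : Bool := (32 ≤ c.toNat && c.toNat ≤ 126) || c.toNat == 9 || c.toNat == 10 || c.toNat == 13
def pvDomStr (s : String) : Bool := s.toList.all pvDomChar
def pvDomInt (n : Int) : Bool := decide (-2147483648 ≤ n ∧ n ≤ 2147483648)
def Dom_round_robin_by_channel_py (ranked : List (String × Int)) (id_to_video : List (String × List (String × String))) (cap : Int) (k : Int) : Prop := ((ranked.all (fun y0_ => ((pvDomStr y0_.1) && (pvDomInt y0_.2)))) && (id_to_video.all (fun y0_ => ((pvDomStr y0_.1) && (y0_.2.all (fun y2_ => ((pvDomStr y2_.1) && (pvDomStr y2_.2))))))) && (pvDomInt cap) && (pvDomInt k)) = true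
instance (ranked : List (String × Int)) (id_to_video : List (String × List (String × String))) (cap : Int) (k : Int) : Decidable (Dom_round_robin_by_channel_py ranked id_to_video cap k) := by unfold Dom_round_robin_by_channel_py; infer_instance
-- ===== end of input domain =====

-- B replaces A's destructive while/pop(0)/taken-counter machinery by a pure round-index scan
-- (rounds = min(cap, longest bucket); round r takes buckets[ch][r]); objective: simpler.

-- ===== PORT A =====
-- shared bucket-building phase (identical in A and in B's first phase)
def pvChOf (v : List (String × String)) : String :=
  let cid := PySem.Str.strip (((PySem.Dict.mk v).get? "channel_id").getD "")
  if cid ≠ "" then cid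
  else PySem.Str.lower (PySem.Str.strip (((PySem.Dict.mk v).get? "channel_title").getD ""))

def pvBuildBuckets (ranked : List (String × Int)) (id_to_video : List (String × List (String × String))) : PySem.Dict String (List String) :=
  ranked.foldl (fun b p =>
    match (PySem.Dict.mk id_to_video).get? p.1 with
    | none => b
    | some v => if v.isEmpty then b else b.modify (pvChOf v) [] (· ++ [p.1])) PySem.Dict.empty

-- one pass of A's inner `for ch in list(buckets.keys())`
def pvRoundA (cap k : Int) : List String → PySem.Dict String (List String) → PySem.Dict String Int → List String →
    PySem.Dict String (List String) × PySem.Dict String Int × List String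
  | [], b, t, out => (b, t, out)
  | ch :: ks, b, t, out =>
    match b.get? ch with
    | none => pvRoundA cap k ks b t out   -- defaultdict would insert [] then delete it: net no-op (key always present in reachable states)
    | some lst =>
      if lst.isEmpty then pvRoundA cap k ks (b.erase ch) t out
      else if cap ≤ t.getD ch 0 then pvRoundA cap k ks (b.erase ch) t out
      else
        let out' := out ++ [lst.headI]
        let b' := b.insert ch lst.tail
        let t' := t.insert ch (t.getD ch 0 + 1)
        if k ≤ (out'.length : Int) then (b', t', out') else pvRoundA cap k ks b' t' out'

-- A's `while len(out_ids) < k and buckets`; fuel is only a totality guard (bounds the iteration count)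
def pvLoopA (cap k : Int) : Nat → PySem.Dict String (List String) → PySem.Dict String Int → List String → List String
  | 0, _, _, out => out
  | fuel + 1, b, t, out =>
    if (out.length : Int) < k ∧ b.items ≠ [] then
      let res := pvRoundA cap k b.keys b t out
      pvLoopA cap k fuel res.1 res.2.1 res.2.2
    else out

def round_robin_by_channel_py (ranked : List (String × Int)) (id_to_video : List (String × List (String × String))) (cap : Int) (k : Int) : List String :=
  let buckets := pvBuildBuckets ranked id_to_video
  pvLoopA cap k ((buckets.values.map List.length).foldl max 0 + 1) buckets PySem.Dict.empty []

-- ===== PORT B =====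
-- B's inner `for ch in channels` at round index r (Bool = early `return out_ids` fired)
def pvRoundB (k : Int) (buckets : PySem.Dict String (List String)) (r : Nat) : List String → List String → List String × Bool
  | [], out => (out, false)
  | ch :: cs, out =>
    if k ≤ (out.length : Int) then (out, true)
    else
      let b := buckets.getD ch []
      if r < b.length then pvRoundB k buckets r cs (out ++ [b.getD r ""])
      else pvRoundB k buckets r cs out

-- B's `for r in range(rounds)`
def pvLoopB (k : Int) (channels : List String) (buckets : PySem.Dict String (List String)) : List Nat → List String → List String
  | [], out => out
  | r :: rs, out =>
    let res := pvRoundB k buckets r channels out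
    if res.2 then res.1 else pvLoopB k channels buckets rs res.1

def round_robin_by_channel_py_alt (ranked : List (String × Int)) (id_to_video : List (String × List (String × String))) (cap : Int) (k : Int) : List String :=
  let buckets := pvBuildBuckets ranked id_to_video
  let channels := buckets.keys
  let rounds : Int := min cap ((buckets.values.map (fun b => (b.length : Int))).foldl max 0)
  pvLoopB k channels buckets (List.range rounds.toNat) []

-- ===== PRECONDITION & SPEC =====
def Spec_round_robin_by_channel_py (ranked : List (String × Int)) (id_to_video : List (String × List (String × String))) (cap : Int) (k : Int) (out : List String) : Prop := out = round_robin_by_channel_py_alt ranked id_to_video cap k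
instance (ranked : List (String × Int)) (id_to_video : List (String × List (String × String))) (cap : Int) (k : Int) (out : List String) : Decidable (Spec_round_robin_by_channel_py ranked id_to_video cap k out) := by unfold Spec_round_robin_by_channel_py; infer_instance

-- ===== CLAIM (what is proved, stated in full; the proofs are below) =====
def Claim_equal_round_robin_by_channel_py : Prop := ∀ (ranked : List (String × Int)) (id_to_video : List (String × List (String × String))) (cap : Int) (k : Int), Dom_round_robin_by_channel_py ranked id_to_video cap k → Spec_round_robin_by_channel_py ranked id_to_video cap k (round_robin_by_channel_py ranked id_to_video cap k)

-- ===== LEMMAS AND PROOFS =====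

-- the remaining bucket contents at the start of round r (channels with < r elements already deleted)
def pvLam (items : List (String × List String)) (r : Nat) : List (String × List String) :=
  items.filterMap (fun p => if r ≤ p.2.length then some (p.1, p.2.drop r) else none)

-- the ids appended during round r (no k-truncation)
def pvPicks (items : List (String × List String)) (r : Nat) : List String :=
  items.filterMap (fun p => p.2[r]?)

-- canonical loop both sides are reduced to
def pvLoopC (k : Int) (items : List (String × List String)) : List Nat → List String → List String
  | [], out => out
  | r :: rs, out =>
    if k ≤ (out.length : Int) then out
    else pvLoopC k items rs (out ++ (pvPicks items r).take (k.toNat - out.length))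

def pvStep (l : List (String × List String)) : List (String × List String) :=
  l.filterMap (fun p => if p.2.isEmpty then none else some (p.1, p.2.tail))

theorem pvLoopC_saturate (k : Int) (items : List (String × List String)) (rs : List Nat) (out : List String)
    (h : k ≤ (out.length : Int)) : pvLoopC k items rs out = out := by
  cases rs <;> simp [pvLoopC, h]

-- ---- small Dict.mk lemmas ----
theorem pv_get?_mk_cons_self (c : String) (v : List String) (l : List (String × List String)) :
    (PySem.Dict.mk ((c, v) :: l)).get? c = some v := by
  simp [PySem.Dict.get?, List.find?]

theorem pv_get?_mk_cons_ne (e : String × List String) (l : List (String × List String)) (c : String)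
    (h : e.1 ≠ c) : (PySem.Dict.mk (e :: l)).get? c = (PySem.Dict.mk l).get? c := by
  simp only [PySem.Dict.get?]
  rw [List.find?_cons_of_neg]
  simp [h]

theorem pv_erase_mk_cons_self (c : String) (v : List String) (l : List (String × List String))
    (h : c ∉ l.map Prod.fst) : (PySem.Dict.mk ((c, v) :: l)).erase c = PySem.Dict.mk l := by
  simp only [PySem.Dict.erase, List.filter_cons, beq_self_eq_true, Bool.not_true, if_false]
  congr 1
  apply List.filter_eq_self.2
  intro p hp
  simp only [Bool.not_eq_eq_eq_not, Bool.not_false]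
  exact beq_eq_false_iff_ne.2 (fun hc => h (hc ▸ List.mem_map_of_mem hp))

theorem pv_erase_mk_cons_ne (e : String × List String) (l : List (String × List String)) (c : String)
    (h : e.1 ≠ c) : (PySem.Dict.mk (e :: l)).erase c = PySem.Dict.mk (e :: ((PySem.Dict.mk l).erase c).items) := by
  simp [PySem.Dict.erase, List.filter_cons, beq_eq_false_iff_ne.2 h]

theorem pv_contains_mk_cons_ne (e : String × List String) (l : List (String × List String)) (c : String)
    (h : e.1 ≠ c) : (PySem.Dict.mk (e :: l)).contains c = (PySem.Dict.mk l).contains c := by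
  simp [PySem.Dict.contains, h]

theorem pv_insert_mk_cons_self (c : String) (v w : List String) (l : List (String × List String))
    (h : c ∉ l.map Prod.fst) : (PySem.Dict.mk ((c, v) :: l)).insert c w = PySem.Dict.mk ((c, w) :: l) := by
  have hc : (PySem.Dict.mk ((c, v) :: l)).contains c = true := by
    simp [PySem.Dict.contains]
  simp only [PySem.Dict.insert, hc, if_true]
  congr 1
  simp only [List.map_cons, beq_self_eq_true, if_true]
  congr 1
  conv_rhs => rw [← List.map_id l]
  apply List.map_congr_left
  intro p hp
  have : p.1 ≠ c := fun hc' => h (hc' ▸ List.mem_map_of_mem hp)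
  simp [beq_eq_false_iff_ne.2 this]

theorem pv_insert_mk_cons_ne (e : String × List String) (l : List (String × List String)) (c : String) (w : List String)
    (h : e.1 ≠ c) : (PySem.Dict.mk (e :: l)).insert c w = PySem.Dict.mk (e :: ((PySem.Dict.mk l).insert c w).items) := by
  by_cases hc : (PySem.Dict.mk l).contains c = true
  · have hc' : (PySem.Dict.mk (e :: l)).contains c = true := by
      rw [pv_contains_mk_cons_ne e l c h]; exact hc
    simp only [PySem.Dict.insert, hc, hc', if_true, List.map_cons]
    congr 2
    simp [beq_eq_false_iff_ne.2 h]
  · have hc' : ¬ (PySem.Dict.mk (e :: l)).contains c = true := by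
      rw [pv_contains_mk_cons_ne e l c h]; exact hc
    simp [PySem.Dict.insert, hc, hc']

-- ---- A's round: frame lemma (an untouched head entry passes through) ----
theorem pvRoundA_frame (cap k : Int) (ks : List String) :
    ∀ (e : String × List String) (l : List (String × List String)) (t : PySem.Dict String Int) (out : List String),
    e.1 ∉ ks →
    pvRoundA cap k ks (PySem.Dict.mk (e :: l)) t out =
      (let res := pvRoundA cap k ks (PySem.Dict.mk l) t out
       (PySem.Dict.mk (e :: res.1.items), res.2.1, res.2.2)) := by
  induction ks with
  | nil => intro e l t out _; rfl
  | cons ch ks ih =>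
    intro e l t out hne
    have h1 : e.1 ≠ ch := fun h => hne (h ▸ List.mem_cons_self ..)
    have h2 : e.1 ∉ ks := fun h => hne (List.mem_cons_of_mem _ h)
    simp only [pvRoundA, pv_get?_mk_cons_ne e l ch h1]
    cases hg : (PySem.Dict.mk l).get? ch with
    | none => exact ih e l t out h2
    | some lst =>
      by_cases he : lst.isEmpty
      · simp only [he, if_true, pv_erase_mk_cons_ne e l ch h1]
        exact ih e _ t out h2
      · by_cases hcap : cap ≤ t.getD ch 0
        · simp only [he, if_false, hcap, if_true, pv_erase_mk_cons_ne e l ch h1]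
          exact ih e _ t out h2
        · simp only [he, if_false, hcap, pv_insert_mk_cons_ne e l ch lst.tail h1]
          by_cases hk : k ≤ (out.length : Int) + 1
          · simp [hk]
          · simp only [List.length_append, List.length_cons, List.length_nil, Nat.zero_add, Nat.cast_add, Nat.cast_one, hk, if_false]
            exact ih e _ _ _ h2

-- ---- A's round: output characterisation (valid whether or not the break fires) ----
theorem pvRoundA_out (cap k : Int) :
    ∀ (l : List (String × List String)) (t : PySem.Dict String Int) (out : List String),
    (l.map Prod.fst).Nodup →
    (∀ p ∈ l, t.getD p.1 0 < cap) →
    (out.length : Int) < k →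
    (pvRoundA cap k (l.map Prod.fst) (PySem.Dict.mk l) t out).2.2 =
      out ++ (l.filterMap (fun p => p.2.head?)).take (k.toNat - out.length) := by
  intro l
  induction l with
  | nil => intro t out _ _ _; simp [pvRoundA]
  | cons p l ih =>
    intro t out hnd ht hk
    obtain ⟨c, lst⟩ := p
    rw [List.map_cons] at hnd
    have hcnod : c ∉ l.map Prod.fst := (List.nodup_cons.1 hnd).1
    have hnd' := (List.nodup_cons.1 hnd).2
    cases lst with
    | nil =>
      simp only [List.map_cons, pvRoundA, pv_get?_mk_cons_self, List.isEmpty_nil, if_true,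
        pv_erase_mk_cons_self c [] l hcnod]
      rw [ih t out hnd' (fun q hq => ht q (List.mem_cons_of_mem _ hq)) hk]
      simp
    | cons a as =>
      have hcap : ¬ cap ≤ t.getD c 0 := not_le.2 (ht (c, a :: as) (List.mem_cons_self ..))
      have hm : out.length < k.toNat := by omega
      simp only [List.map_cons, pvRoundA, pv_get?_mk_cons_self, List.isEmpty_cons, hcap, if_false,
        Bool.false_eq_true, List.headI, List.tail_cons, List.length_append, List.length_cons,
        List.length_nil, Nat.zero_add, Nat.cast_add, Nat.cast_one]
      by_cases hk2 : k ≤ (out.length : Int) + 1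
      · have h1 : k.toNat - out.length = 1 := by omega
        simp [hk2, h1]
      · have hlen : k.toNat - out.length = (k.toNat - (out.length + 1)) + 1 := by omega
        rw [if_neg hk2, pv_insert_mk_cons_self c (a :: as) as l hcnod,
          pvRoundA_frame cap k (l.map Prod.fst) (c, as) l _ _ hcnod]
        have ht' : ∀ q ∈ l, (t.insert c (t.getD c 0 + 1)).getD q.1 0 < cap := by
          intro q hq
          have hqc : q.1 ≠ c := fun hc' => hcnod (hc' ▸ List.mem_map_of_mem hq)
          rw [PySem.Dict.getD_insert_of_ne _ _ _ hqc]
          exact ht q (List.mem_cons_of_mem _ hq)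
        have hk' : ((out ++ [a]).length : Int) < k := by
          simp only [List.length_append, List.length_cons, List.length_nil, Nat.zero_add,
            Nat.cast_add, Nat.cast_one]
          omega
        calc (pvRoundA cap k (l.map Prod.fst) (PySem.Dict.mk l) (t.insert c (t.getD c 0 + 1)) (out ++ [a])).2.2
            = (out ++ [a]) ++ (l.filterMap (fun p => p.2.head?)).take (k.toNat - (out ++ [a]).length) :=
              ih _ _ hnd' ht' hk'
          _ = out ++ (((c, a :: as) :: l).filterMap (fun p => p.2.head?)).take (k.toNat - out.length) := by
              simp only [List.filterMap_cons, List.head?_cons, List.length_append,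
                List.length_cons, List.length_nil, Nat.zero_add]
              rw [hlen, List.take_succ_cons, List.append_assoc]
              rfl

-- ---- A's round: full characterisation when the break does not fire ----
theorem pvRoundA_nobreak (cap k : Int) :
    ∀ (l : List (String × List String)) (t : PySem.Dict String Int) (out : List String),
    (l.map Prod.fst).Nodup →
    (∀ p ∈ l, t.getD p.1 0 < cap) →
    (out.length : Int) < k →
    ((out.length : Int) + ((l.filterMap (fun p => p.2.head?)).length : Int) < k) →
    (pvRoundA cap k (l.map Prod.fst) (PySem.Dict.mk l) t out).1 = PySem.Dict.mk (pvStep l)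
    ∧ (∀ x : String, (pvRoundA cap k (l.map Prod.fst) (PySem.Dict.mk l) t out).2.1.getD x 0 =
        t.getD x 0 + (if x ∈ (l.filter (fun p => !p.2.isEmpty)).map Prod.fst then 1 else 0))
    ∧ (pvRoundA cap k (l.map Prod.fst) (PySem.Dict.mk l) t out).2.2 = out ++ l.filterMap (fun p => p.2.head?) := by
  intro l
  induction l with
  | nil => intro t out _ _ _ _; simp [pvRoundA, pvStep]
  | cons p l ih =>
    intro t out hnd ht hk hbk
    obtain ⟨c, lst⟩ := p
    rw [List.map_cons] at hnd
    have hcnod : c ∉ l.map Prod.fst := (List.nodup_cons.1 hnd).1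
    have hnd' := (List.nodup_cons.1 hnd).2
    cases lst with
    | nil =>
      simp only [List.map_cons, pvRoundA, pv_get?_mk_cons_self, List.isEmpty_nil, if_true,
        pv_erase_mk_cons_self c [] l hcnod]
      have hbk' : (out.length : Int) + ((l.filterMap (fun p => p.2.head?)).length : Int) < k := by
        simpa using hbk
      have := ih t out hnd' (fun q hq => ht q (List.mem_cons_of_mem _ hq)) hk hbk'
      refine ⟨?_, ?_, ?_⟩
      · rw [this.1]; simp [pvStep]
      · intro x
        have hfe : List.filter (fun p => !p.2.isEmpty) ((c, ([] : List String)) :: l) =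
            List.filter (fun p => !p.2.isEmpty) l := by
          rw [List.filter_cons]; simp
        rw [this.2.1, hfe]
      · rw [this.2.2]; simp
    | cons a as =>
      have hcap : ¬ cap ≤ t.getD c 0 := not_le.2 (ht (c, a :: as) (List.mem_cons_self ..))
      have hpk : (((c, a :: as) :: l).filterMap (fun p => p.2.head?)) =
          a :: l.filterMap (fun p => p.2.head?) := by simp
      have hk2 : ¬ k ≤ (out.length : Int) + 1 := by
        rw [hpk] at hbk; simp only [List.length_cons] at hbk; push_cast at hbk; omega
      simp only [List.map_cons, pvRoundA, pv_get?_mk_cons_self, List.isEmpty_cons, hcap, if_false,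
        Bool.false_eq_true, List.headI, List.tail_cons, List.length_append, List.length_cons,
        List.length_nil, Nat.zero_add, Nat.cast_add, Nat.cast_one]
      rw [if_neg hk2, pv_insert_mk_cons_self c (a :: as) as l hcnod,
        pvRoundA_frame cap k (l.map Prod.fst) (c, as) l _ _ hcnod]
      have ht' : ∀ q ∈ l, (t.insert c (t.getD c 0 + 1)).getD q.1 0 < cap := by
        intro q hq
        have hqc : q.1 ≠ c := fun hc' => hcnod (hc' ▸ List.mem_map_of_mem hq)
        rw [PySem.Dict.getD_insert_of_ne _ _ _ hqc]
        exact ht q (List.mem_cons_of_mem _ hq)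
      have hk' : (((out ++ [a]).length : Int)) < k := by
        simp only [List.length_append, List.length_cons, List.length_nil, Nat.zero_add]
        push_cast; omega
      have hbk' : (((out ++ [a]).length : Int)) + ((l.filterMap (fun p => p.2.head?)).length : Int) < k := by
        rw [hpk] at hbk; simp only [List.length_append, List.length_cons, List.length_nil,
          Nat.zero_add] at hbk ⊢
        push_cast at hbk ⊢; omega
      have H := ih (t.insert c (t.getD c 0 + 1)) (out ++ [a]) hnd' ht' hk' hbk'
      refine ⟨?_, ?_, ?_⟩
      · simp only []
        rw [H.1]
        simp [pvStep]
      · intro x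
        simp only []
        rw [H.2.1 x]
        by_cases hx : x = c
        · subst hx
          rw [PySem.Dict.getD_insert_self]
          have hx1 : x ∉ (l.filter (fun p => !p.2.isEmpty)).map Prod.fst := by
            intro hmem
            obtain ⟨q, hq, hq1⟩ := List.mem_map.1 hmem
            exact hcnod (hq1 ▸ List.mem_map_of_mem (List.mem_of_mem_filter hq))
          have hx2 : x ∈ (((x, a :: as) :: l).filter (fun p => !p.2.isEmpty)).map Prod.fst := by
            simp [List.filter_cons]
          rw [if_neg hx1, if_pos hx2]
          omega
        · rw [PySem.Dict.getD_insert_of_ne _ _ _ hx]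
          have : (x ∈ (((c, a :: as) :: l).filter (fun p => !p.2.isEmpty)).map Prod.fst)
              ↔ (x ∈ (l.filter (fun p => !p.2.isEmpty)).map Prod.fst) := by
            simp [List.filter_cons, hx]
          by_cases hm : x ∈ (l.filter (fun p => !p.2.isEmpty)).map Prod.fst
          · rw [if_pos hm, if_pos (this.2 hm)]
          · rw [if_neg hm, if_neg (fun h => hm (this.1 h))]
      · simp only []
        rw [H.2.2, hpk, List.append_assoc]
        rfl

-- ---- A's final round: every surviving channel is exhausted or capped; everything is deleted ----
theorem pvRoundA_cleanup (cap k : Int) :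
    ∀ (l : List (String × List String)) (t : PySem.Dict String Int) (out : List String),
    (l.map Prod.fst).Nodup →
    (∀ p ∈ l, p.2 = [] ∨ cap ≤ t.getD p.1 0) →
    pvRoundA cap k (l.map Prod.fst) (PySem.Dict.mk l) t out = (PySem.Dict.mk [], t, out) := by
  intro l
  induction l with
  | nil => intro t out _ _; rfl
  | cons p l ih =>
    intro t out hnd hd
    obtain ⟨c, lst⟩ := p
    rw [List.map_cons] at hnd
    have hcnod : c ∉ l.map Prod.fst := (List.nodup_cons.1 hnd).1
    have hnd' := (List.nodup_cons.1 hnd).2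
    have hd' : ∀ p ∈ l, p.2 = [] ∨ cap ≤ t.getD p.1 0 := fun q hq => hd q (List.mem_cons_of_mem _ hq)
    cases lst with
    | nil =>
      simp only [List.map_cons, pvRoundA, pv_get?_mk_cons_self, List.isEmpty_nil, if_true,
        pv_erase_mk_cons_self c [] l hcnod]
      exact ih t out hnd' hd'
    | cons a as =>
      have hcap : cap ≤ t.getD c 0 := by
        rcases hd (c, a :: as) (List.mem_cons_self ..) with h | h
        · exact absurd h (by simp)
        · exact h
      simp only [List.map_cons, pvRoundA, pv_get?_mk_cons_self, List.isEmpty_cons,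
        Bool.false_eq_true, if_false, if_pos hcap,
        pv_erase_mk_cons_self c (a :: as) l hcnod]
      exact ih t out hnd' hd'

-- ---- B's round characterisation ----
theorem pvRoundB_out (k : Int) (buckets : PySem.Dict String (List String)) (r : Nat) :
    ∀ (cs : List String) (out : List String),
    (pvRoundB k buckets r cs out).1 =
      out ++ (cs.filterMap (fun c => (buckets.getD c [])[r]?)).take (k.toNat - out.length)
    ∧ ((pvRoundB k buckets r cs out).2 = true → k ≤ (((pvRoundB k buckets r cs out).1.length : Int)))
    ∧ (cs ≠ [] → (pvRoundB k buckets r cs out).2 = false → (out.length : Int) < k) := by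
  intro cs
  induction cs with
  | nil => intro out; simp [pvRoundB]
  | cons c cs ih =>
    intro out
    by_cases hk : k ≤ (out.length : Int)
    · have hm : k.toNat - out.length = 0 := by omega
      simp [pvRoundB, hk, hm]
    · simp only [pvRoundB, if_neg hk]
      by_cases hr : r < (buckets.getD c []).length
      · have hget : (buckets.getD c [])[r]? = some ((buckets.getD c []).getD r "") := by
          rw [List.getElem?_eq_getElem hr, List.getD_eq_getElem _ _ hr]
        have hm : k.toNat - out.length = (k.toNat - (out ++ [(buckets.getD c []).getD r ""]).length) + 1 := by
          simp only [List.length_append, List.length_cons, List.length_nil, Nat.zero_add]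
          omega
        simp only [hr, if_true]
        have H := ih (out ++ [(buckets.getD c []).getD r ""])
        refine ⟨?_, H.2.1, fun _ _ => not_le.1 hk⟩
        · rw [H.1]
          simp only [List.filterMap_cons, hget, hm, List.take_succ_cons, List.append_assoc]
          rfl
      · have hget : (buckets.getD c [])[r]? = none :=
          List.getElem?_eq_none (Nat.le_of_not_lt hr)
        simp only [hr, if_false]
        have H := ih out
        refine ⟨?_, H.2.1, fun _ _ => not_le.1 hk⟩
        rw [H.1]
        simp [hget]

-- ---- loop shells ----
theorem pvLoopA_stop (cap k : Int) (fuel : Nat) (b : PySem.Dict String (List String))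
    (t : PySem.Dict String Int) (out : List String) (h : ¬ (out.length : Int) < k) :
    pvLoopA cap k fuel b t out = out := by
  cases fuel <;> simp [pvLoopA, h]

theorem pvLoopA_empty (cap k : Int) (fuel : Nat) (t : PySem.Dict String Int) (out : List String) :
    pvLoopA cap k fuel (PySem.Dict.mk []) t out = out := by
  cases fuel <;> simp [pvLoopA]

theorem pvLoopB_nil_channels (k : Int) (b : PySem.Dict String (List String)) :
    ∀ (rs : List Nat) (out : List String), pvLoopB k [] b rs out = out := by
  intro rs
  induction rs with
  | nil => intro out; rfl
  | cons r rs ih => intro out; simp [pvLoopB, pvRoundB, ih]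

theorem pvLoopC_nil_items (k : Int) :
    ∀ (rs : List Nat) (out : List String), pvLoopC k [] rs out = out := by
  intro rs
  induction rs with
  | nil => intro out; rfl
  | cons r rs ih =>
    intro out
    by_cases h : k ≤ (out.length : Int)
    · simp [pvLoopC, h]
    · simp [pvLoopC, h, pvPicks, ih]

-- ---- structural glue ----
theorem pvLam_zero (items : List (String × List String)) : pvLam items 0 = items := by
  simp [pvLam]

theorem pv_keys_pvStep (l : List (String × List String)) :
    (pvStep l).map Prod.fst = (l.filter (fun p => !p.2.isEmpty)).map Prod.fst := by
  induction l with
  | nil => rfl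
  | cons p l ih =>
    simp only [pvStep] at ih ⊢
    by_cases hp : p.2.isEmpty
    · have h1 : (if p.2.isEmpty then none else some (p.1, p.2.tail)) = (none : Option (String × List String)) := by
        simp [hp]
      have h2 : List.filter (fun q => !q.2.isEmpty) (p :: l) = List.filter (fun q => !q.2.isEmpty) l := by
        rw [List.filter_cons]; simp [hp]
      rw [List.filterMap_cons, h1, h2]; exact ih
    · have h1 : (if p.2.isEmpty then none else some (p.1, p.2.tail)) = some (p.1, p.2.tail) := by
        simp [hp]
      have h2 : List.filter (fun q => !q.2.isEmpty) (p :: l) = p :: List.filter (fun q => !q.2.isEmpty) l := by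
        rw [List.filter_cons]; simp [hp]
      rw [List.filterMap_cons, h1, h2, List.map_cons, List.map_cons, ih]

theorem pvStep_pvLam (items : List (String × List String)) (r : Nat) :
    pvStep (pvLam items r) = pvLam items (r + 1) := by
  simp only [pvStep, pvLam, List.filterMap_filterMap]
  congr 1
  funext p
  by_cases h : r ≤ p.2.length
  · by_cases h2 : r + 1 ≤ p.2.length
    · have hne : ¬ (p.2.drop r).isEmpty = true := by
        rw [List.isEmpty_iff, List.drop_eq_nil_iff]; omega
      simp only [h, if_true, Option.bind_some, hne, if_false, h2, List.tail_drop]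
      simp
    · have hemp : (p.2.drop r).isEmpty = true := by
        rw [List.isEmpty_iff, List.drop_eq_nil_iff]; omega
      simp [h, h2]
      omega
  · have h2 : ¬ r + 1 ≤ p.2.length := by omega
    simp [h, h2]

theorem pvPicks_pvLam (items : List (String × List String)) (r : Nat) :
    (pvLam items r).filterMap (fun p => p.2.head?) = pvPicks items r := by
  simp only [pvLam, pvPicks, List.filterMap_filterMap]
  congr 1
  funext p
  by_cases h : r ≤ p.2.length
  · simp [h, List.head?_drop]
  · have : p.2[r]? = none := List.getElem?_eq_none (by omega)
    simp [h, this]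

theorem pvLam_keys_sublist (items : List (String × List String)) (r : Nat) :
    ((pvLam items r).map Prod.fst).Sublist (items.map Prod.fst) := by
  induction items with
  | nil => simp [pvLam]
  | cons p l ih =>
    by_cases h : r ≤ p.2.length
    · simpa [pvLam, List.filterMap_cons, h] using ih.cons₂ p.1
    · simpa [pvLam, List.filterMap_cons, h] using ih.cons p.1

-- ---- fold-max facts ----
theorem pv_foldl_max_le : ∀ (ns : List Nat) (a b : Nat), a ≤ b → (∀ x ∈ ns, x ≤ b) → ns.foldl max a ≤ b := by
  intro ns
  induction ns with
  | nil => intro a b h _; exact h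
  | cons n ns ih =>
    intro a b h hall
    exact ih (max a n) b (max_le h (hall n (List.mem_cons_self ..)))
      (fun x hx => hall x (List.mem_cons_of_mem _ hx))

theorem pv_le_foldl_max_init : ∀ (ns : List Nat) (a : Nat), a ≤ ns.foldl max a := by
  intro ns
  induction ns with
  | nil => intro a; exact le_rfl
  | cons n ns ih => intro a; exact le_trans (le_max_left a n) (ih (max a n))

theorem pv_le_foldl_max_mem : ∀ (ns : List Nat) (a x : Nat), x ∈ ns → x ≤ ns.foldl max a := by
  intro ns
  induction ns with
  | nil => intro a x hx; simp at hx
  | cons n ns ih =>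
    intro a x hx
    rcases List.mem_cons.1 hx with h | h
    · subst h; exact le_trans (le_max_right a x) (pv_le_foldl_max_init ns (max a x))
    · exact ih (max a n) x h

def pvMaxlen (items : List (String × List String)) : Nat :=
  (items.map (fun p => p.2.length)).foldl max 0

def pvRtot (cap : Int) (items : List (String × List String)) : Nat :=
  min cap.toNat (pvMaxlen items)

theorem pv_len_le_maxlen (items : List (String × List String)) (p : String × List String)
    (hp : p ∈ items) : p.2.length ≤ pvMaxlen items :=
  pv_le_foldl_max_mem _ 0 _ (List.mem_map_of_mem hp)

theorem pvLam_nil_bound (cap : Int) (items : List (String × List String)) (r : Nat)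
    (h : pvLam items r = []) : pvRtot cap items ≤ r := by
  cases items with
  | nil =>
    have : pvMaxlen [] = 0 := rfl
    simp [pvRtot, this]
  | cons p l =>
    have hall : ∀ q ∈ p :: l, q.2.length < r := by
      intro q hq
      have := List.filterMap_eq_nil_iff.1 h q hq
      by_cases hcond : r ≤ q.2.length
      · simp [hcond] at this
      · omega
    have hr : 1 ≤ r := by have := hall p (List.mem_cons_self ..); omega
    have hmax : pvMaxlen (p :: l) ≤ r - 1 := by
      apply pv_foldl_max_le _ 0 (r - 1) (by omega)
      intro x hx
      obtain ⟨q, hq, hq1⟩ := List.mem_map.1 hx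
      have := hall q hq
      omega
    calc pvRtot cap (p :: l) ≤ pvMaxlen (p :: l) := Nat.min_le_right _ _
      _ ≤ r := by omega

theorem pv_foldl_max_cast : ∀ (ns : List Nat) (a : Nat),
    (ns.map (Nat.cast : Nat → Int)).foldl max (a : Int) = ((ns.foldl max a : Nat) : Int) := by
  intro ns
  induction ns with
  | nil => intro a; rfl
  | cons n ns ih =>
    intro a
    simp only [List.map_cons, List.foldl_cons]
    rw [← Nat.cast_max, ih]

-- ---- B's loop equals the canonical loop ----
theorem pvLoopB_eq (k : Int) (b0 : PySem.Dict String (List String)) (hnd : b0.keys.Nodup) :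
    ∀ (rs : List Nat) (out : List String), pvLoopB k b0.keys b0 rs out = pvLoopC k b0.items rs out := by
  have hitems := PySem.Dict.items_eq_map_keys b0 hnd []
  have hpicks : ∀ r : Nat, pvPicks b0.items r = b0.keys.filterMap (fun c => (b0.getD c [])[r]?) := by
    intro r
    show b0.items.filterMap (fun p => p.2[r]?) = _
    rw [hitems, List.filterMap_map]
    rfl
  cases hc : b0.keys with
  | nil =>
    have hit : b0.items = [] := by
      rw [hc] at hitems; simpa using hitems
    intro rs out
    rw [hit, pvLoopB_nil_channels, pvLoopC_nil_items]
  | cons c cs =>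
    intro rs
    induction rs with
    | nil => intro out; rfl
    | cons r rs ih =>
      intro out
      have H := pvRoundB_out k b0 r (c :: cs) out
      have hpicks' : pvPicks b0.items r = (c :: cs).filterMap (fun x => (b0.getD x [])[r]?) := by
        rw [hpicks r, hc]
      simp only [pvLoopB]
      cases hfl : (pvRoundB k b0 r (c :: cs) out).2 with
      | true =>
        rw [if_pos rfl]
        by_cases hko : k ≤ (out.length : Int)
        · have hm : k.toNat - out.length = 0 := by omega
          simp only [pvLoopC]
          rw [if_pos hko, H.1, hm, List.take_zero, List.append_nil]
        · simp only [pvLoopC]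
          rw [if_neg hko, hpicks', ← H.1,
            pvLoopC_saturate k b0.items rs _ (H.2.1 hfl)]
      | false =>
        rw [if_neg Bool.false_ne_true]
        have hko : (out.length : Int) < k := H.2.2 (by simp) hfl
        simp only [pvLoopC]
        rw [if_neg (not_le.2 hko), ih, H.1, hpicks']

-- ---- A's loop equals the canonical loop ----
theorem pvLoopA_eq (cap k : Int) (items0 : List (String × List String))
    (hnd0 : (items0.map Prod.fst).Nodup) :
    ∀ (fuel : Nat) (r : Nat) (t : PySem.Dict String Int) (out : List String),
    r ≤ pvRtot cap items0 →
    pvRtot cap items0 + 1 - r ≤ fuel →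
    (∀ p ∈ pvLam items0 r, t.getD p.1 0 = (r : Int)) →
    pvLoopA cap k fuel (PySem.Dict.mk (pvLam items0 r)) t out =
      pvLoopC k items0 (List.range' r (pvRtot cap items0 - r)) out := by
  intro fuel
  induction fuel with
  | zero => intro r t out hr hf ht; exact absurd hf (by omega)
  | succ fuel ih =>
    intro r t out hr hf ht
    by_cases hk : (out.length : Int) < k
    · by_cases hb : pvLam items0 r = []
      · have h2 : pvRtot cap items0 ≤ r := pvLam_nil_bound cap items0 r hb
        have h3 : pvRtot cap items0 - r = 0 := by omega
        rw [hb, pvLoopA_empty, h3]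
        rfl
      · have hcond : ((out.length : Int) < k ∧ (PySem.Dict.mk (pvLam items0 r)).items ≠ []) :=
          ⟨hk, by simpa using hb⟩
        have hkeys : (PySem.Dict.mk (pvLam items0 r)).keys = (pvLam items0 r).map Prod.fst := rfl
        have hndr : ((pvLam items0 r).map Prod.fst).Nodup := (pvLam_keys_sublist items0 r).nodup hnd0
        rcases lt_or_eq_of_le hr with hrlt | hreq
        · -- a genuine round r < pvRtot
          have hcapr : (r : Int) < cap := by
            have h1 : r < cap.toNat := lt_of_lt_of_le hrlt (Nat.min_le_left _ _)
            omega
          have htlt : ∀ p ∈ pvLam items0 r, t.getD p.1 0 < cap := fun p hp => by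
            rw [ht p hp]; exact hcapr
          by_cases hbrk : (out.length : Int) +
              (((pvLam items0 r).filterMap (fun p => p.2.head?)).length : Int) < k
          · -- no break: full round, recurse
            obtain ⟨hb1, hb2, hb3⟩ := pvRoundA_nobreak cap k (pvLam items0 r) t out hndr htlt hk hbrk
            simp only [pvLoopA]
            rw [if_pos hcond, hkeys, hb1, hb3, pvStep_pvLam]
            have hrec := ih (r + 1)
              (pvRoundA cap k ((pvLam items0 r).map Prod.fst) (PySem.Dict.mk (pvLam items0 r)) t out).2.1
              (out ++ (pvLam items0 r).filterMap (fun p => p.2.head?))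
              (by omega) (by omega) ?tinv
            case tinv =>
              intro p hp
              rw [hb2 p.1]
              have hmem : p.1 ∈ ((pvLam items0 r).filter (fun q => !q.2.isEmpty)).map Prod.fst := by
                rw [← pv_keys_pvStep, pvStep_pvLam]
                exact List.mem_map_of_mem hp
              obtain ⟨q, hq, hqe⟩ := List.mem_filterMap.1 (by rw [← pvStep_pvLam] at hp; exact hp)
              have hq1 : q.1 = p.1 := by
                by_cases hcq : q.2.isEmpty <;> simp [hcq] at hqe
                rw [← hqe]
              rw [← hq1, ht q hq, hq1, if_pos hmem]
              push_cast
              ring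
            rw [hrec]
            have hsplit : pvRtot cap items0 - r = (pvRtot cap items0 - (r + 1)) + 1 := by omega
            rw [hsplit, List.range'_succ]
            simp only [pvLoopC]
            rw [if_neg (not_le.2 hk)]
            have hsat : ((pvPicks items0 r).length ≤ k.toNat - out.length) := by
              rw [← pvPicks_pvLam]
              omega
            rw [List.take_of_length_le hsat, pvPicks_pvLam]
          · -- break fires inside round r: the loop ends with this round's output
            have hout := pvRoundA_out cap k (pvLam items0 r) t out hndr htlt hk
            simp only [pvLoopA]
            rw [if_pos hcond, hkeys]
            have hklen : ¬ ((((pvRoundA cap k ((pvLam items0 r).map Prod.fst)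
                (PySem.Dict.mk (pvLam items0 r)) t out).2.2).length : Int) < k) := by
              rw [hout]
              simp only [List.length_append, List.length_take]
              push_cast
              omega
            rw [pvLoopA_stop _ _ _ _ _ _ hklen, hout]
            have hsplit : pvRtot cap items0 - r = (pvRtot cap items0 - (r + 1)) + 1 := by omega
            rw [hsplit, List.range'_succ]
            simp only [pvLoopC]
            rw [if_neg (not_le.2 hk)]
            have hlen2 : k ≤ (((out ++ (pvPicks items0 r).take (k.toNat - out.length)).length : Int)) := by
              rw [← pvPicks_pvLam]
              simp only [List.length_append, List.length_take]
              push_cast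
              omega
            rw [pvLoopC_saturate _ _ _ _ hlen2, ← pvPicks_pvLam]
        · -- r = pvRtot: the clean-up round deletes everything and adds nothing
          have hclean : ∀ p ∈ pvLam items0 r, p.2 = [] ∨ cap ≤ t.getD p.1 0 := by
            intro p hp
            by_cases hcm : cap.toNat ≤ pvMaxlen items0
            · right
              rw [ht p hp]
              have h1 : pvRtot cap items0 = cap.toNat := by
                simp only [pvRtot]; omega
              have h2 : cap ≤ ((cap.toNat : Nat) : Int) := Int.self_le_toNat cap
              omega
            · left
              obtain ⟨q, hq, hqe⟩ := List.mem_filterMap.1 hp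
              split_ifs at hqe with hcq
              · simp only [Option.some.injEq] at hqe
                have hlen : q.2.length ≤ pvMaxlen items0 := pv_len_le_maxlen items0 q hq
                have hrm : pvRtot cap items0 = pvMaxlen items0 := by
                  simp only [pvRtot]; omega
                subst hqe
                exact List.drop_eq_nil_of_le (by omega)
          simp only [pvLoopA]
          rw [if_pos hcond, hkeys, pvRoundA_cleanup cap k _ t out hndr hclean]
          show pvLoopA cap k fuel (PySem.Dict.mk []) t out = _
          rw [pvLoopA_empty]
          have h3 : pvRtot cap items0 - r = 0 := by omega
          rw [h3]
          rfl
    · rw [pvLoopA_stop _ _ _ _ _ _ hk, pvLoopC_saturate k items0 _ _ (not_lt.1 hk)]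

-- ---- the bucket dict has unique keys ----
theorem pv_nodup_build (ranked : List (String × Int)) (id_to_video : List (String × List (String × String))) :
    (pvBuildBuckets ranked id_to_video).keys.Nodup := by
  suffices h : ∀ (l : List (String × Int)) (d : PySem.Dict String (List String)), d.keys.Nodup →
      (l.foldl (fun b p =>
        match (PySem.Dict.mk id_to_video).get? p.1 with
        | none => b
        | some v => if v.isEmpty then b else b.modify (pvChOf v) [] (· ++ [p.1])) d).keys.Nodup by
    exact h ranked PySem.Dict.empty (by simp [PySem.Dict.empty, PySem.Dict.keys])
  intro l
  induction l with
  | nil => intro d hd; exact hd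
  | cons p l ih =>
    intro d hd
    simp only [List.foldl_cons]
    apply ih
    cases hg : (PySem.Dict.mk id_to_video).get? p.1 with
    | none => simpa [hg] using hd
    | some v =>
      by_cases hv : v.isEmpty
      · simpa [hg, hv] using hd
      · simp only [hv, Bool.false_eq_true, if_false]
        rw [PySem.Dict.keys_modify]
        exact PySem.Dict.nodup_keys_insert _ _ _ hd

-- ---- assembly ----
theorem pv_fuel_eq (b0 : PySem.Dict String (List String)) :
    (b0.values.map List.length).foldl max 0 = pvMaxlen b0.items := by
  show ((b0.items.map Prod.snd).map List.length).foldl max 0 = _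
  rw [List.map_map]
  rfl

theorem pv_maxlen_cast (b0 : PySem.Dict String (List String)) :
    (b0.values.map (fun (b : List String) => (b.length : Int))).foldl max 0 = ((pvMaxlen b0.items : Nat) : Int) := by
  have h1 : b0.values.map (fun (b : List String) => (b.length : Int)) =
      (b0.items.map (fun p => p.2.length)).map (Nat.cast : Nat → Int) := by
    show (b0.items.map Prod.snd).map (fun (b : List String) => (b.length : Int)) = _
    rw [List.map_map, List.map_map]
    rfl
  rw [h1]
  exact pv_foldl_max_cast (b0.items.map (fun p => p.2.length)) 0

-- ===== VERDICT (by name: the statement is the Claim_ definition above) =====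
theorem round_robin_by_channel_py_spec : Claim_equal_round_robin_by_channel_py := by
  intro ranked id_to_video cap k _
  unfold Spec_round_robin_by_channel_py round_robin_by_channel_py round_robin_by_channel_py_alt
  have hnd : (pvBuildBuckets ranked id_to_video).keys.Nodup := pv_nodup_build ranked id_to_video
  have hnd' : ((pvBuildBuckets ranked id_to_video).items.map Prod.fst).Nodup := hnd
  have hbeq : pvBuildBuckets ranked id_to_video =
      PySem.Dict.mk (pvLam (pvBuildBuckets ranked id_to_video).items 0) := by
    rw [pvLam_zero]
  have hA := pvLoopA_eq cap k (pvBuildBuckets ranked id_to_video).items hnd'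
    (pvMaxlen (pvBuildBuckets ranked id_to_video).items + 1) 0 PySem.Dict.empty []
    (Nat.zero_le _)
    (by
      have := Nat.min_le_right cap.toNat (pvMaxlen (pvBuildBuckets ranked id_to_video).items)
      simp only [pvRtot] at *
      omega)
    (by intro p _; simp [PySem.Dict.getD_empty])
  have hrounds : (min cap (((pvBuildBuckets ranked id_to_video).values.map
      (fun (b : List String) => (b.length : Int))).foldl max 0)).toNat = pvRtot cap (pvBuildBuckets ranked id_to_video).items := by
    rw [pv_maxlen_cast]
    simp only [pvRtot]
    omega
  have hB := pvLoopB_eq k (pvBuildBuckets ranked id_to_video) hnd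
    (List.range (min cap (((pvBuildBuckets ranked id_to_video).values.map
      (fun (b : List String) => (b.length : Int))).foldl max 0)).toNat) []
  show pvLoopA cap k ((((pvBuildBuckets ranked id_to_video).values.map List.length).foldl max 0) + 1)
      (pvBuildBuckets ranked id_to_video) PySem.Dict.empty [] =
    pvLoopB k (pvBuildBuckets ranked id_to_video).keys (pvBuildBuckets ranked id_to_video)
      (List.range (min cap (((pvBuildBuckets ranked id_to_video).values.map
        (fun (b : List String) => (b.length : Int))).foldl max 0)).toNat) []
  rw [pv_fuel_eq, hB, hrounds, List.range_eq_range']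
  conv_lhs => rw [hbeq]
  rw [show (PySem.Dict.mk (pvLam (pvBuildBuckets ranked id_to_video).items 0)).items
      = (pvBuildBuckets ranked id_to_video).items from by rw [pvLam_zero]]
  rw [hA, Nat.sub_zero]
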